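-- pv_equiv track=rewrite | github.com/ethanlevy25/BistableSwitchAlgo | Non-planar Two-state/utils.py | is_planar
-- ===== SOURCE A (Python) =====
-- def ccw(A,B,C):
--     return (C[1]-A[1])*(B[0]-A[0]) > (B[1]-A[1])*(C[0]-A[0])
--
-- def intersect(A,B,C,D):
--     return ccw(A,C,D) != ccw(B,C,D) and ccw(A,B,C) != ccw(A,B,D)
--
-- def is_planar(nodes_x, nodes_y, edges):
--     for i in range(len(edges)):
--         for ii in range(i, len(edges)):
--             a = (nodes_x[edges[i][0]], nodes_y[edges[i][0]])
--             b = (nodes_x[edges[i][1]], nodes_y[edges[i][1]])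
--             c = (nodes_x[edges[ii][0]], nodes_y[edges[ii][0]])
--             d = (nodes_x[edges[ii][1]], nodes_y[edges[ii][1]])
--             if intersect(a,b,c,d): return False
--     return True
-- ===== SOURCE B (Python) =====
-- # B: interval sweep -- sort segments by their left x, keep an active list,
-- # evict segments whose right x lies left of the current segment's left x,
-- # and test each new segment only against the remaining active ones.
-- # Correct because two segments whose x-projections are disjoint cannot cross.
--
-- def _orient(p, q, r):
--     return (q[0] - p[0]) * (r[1] - p[1]) - (q[1] - p[1]) * (r[0] - p[0])
--
-- def _crosses(t, s):
--     a, b = t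
--     c, d = s
--     return ((_orient(a, b, c) > 0) != (_orient(a, b, d) > 0)) and \
--            ((_orient(c, d, a) > 0) != (_orient(c, d, b) > 0))
--
-- def is_planar(nodes_x, nodes_y, edges):
--     segs = [((nodes_x[u], nodes_y[u]), (nodes_x[v], nodes_y[v])) for u, v in edges]
--     segs.sort(key=lambda s: min(s[0][0], s[1][0]))
--     active = []
--     for s in segs:
--         lo = min(s[0][0], s[1][0])
--         active = [t for t in active if lo <= max(t[0][0], t[1][0])]
--         for t in active:
--             if _crosses(t, s):
--                 return False
--         active.append(s)
--     return True
-- ===== Notes on version B (the rewrite author's own statement) =====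
-- stated objective: alternative
-- what changed: B replaces A's all-pairs index scan with an interval sweep: segments are sorted by left x-coordinate, an active list evicts segments ending left of the current one, and crossings are tested only against active segments (correct since x-disjoint segments cannot cross); orientation is a signed area instead of A's boolean ccw.
-- outside the precondition, e.g. on is_planar([0, 2, 0, 2], [0, 2, 2, 0], [(0, 1), (2, 3), (0, 5)]): A returns False, B raises IndexError
import Mathlib
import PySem

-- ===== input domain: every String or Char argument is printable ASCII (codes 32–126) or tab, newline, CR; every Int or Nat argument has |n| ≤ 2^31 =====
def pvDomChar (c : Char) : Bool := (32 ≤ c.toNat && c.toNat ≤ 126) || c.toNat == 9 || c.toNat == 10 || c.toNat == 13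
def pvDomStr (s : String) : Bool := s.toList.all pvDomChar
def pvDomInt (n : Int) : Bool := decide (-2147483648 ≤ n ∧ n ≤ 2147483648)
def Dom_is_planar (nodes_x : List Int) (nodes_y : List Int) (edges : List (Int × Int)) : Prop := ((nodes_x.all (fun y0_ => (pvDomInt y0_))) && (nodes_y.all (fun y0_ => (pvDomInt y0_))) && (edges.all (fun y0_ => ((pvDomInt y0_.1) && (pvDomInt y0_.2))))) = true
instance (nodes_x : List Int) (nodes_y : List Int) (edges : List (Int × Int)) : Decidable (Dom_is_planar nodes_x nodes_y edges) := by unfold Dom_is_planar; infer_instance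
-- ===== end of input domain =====

-- B replaces A's all-pairs index scan by an interval sweep: segments sorted by their left
-- x-coordinate, an active list that evicts segments ending left of the current one, and
-- crossings tested only against active segments (x-disjoint segments cannot cross);
-- same worst-case cost (objective: alternative).

-- ===== PORT A =====
def pvCcw (A B C : Int × Int) : Bool :=
  decide ((C.2 - A.2) * (B.1 - A.1) > (B.2 - A.2) * (C.1 - A.1))

def pvIntersect (A B C D : Int × Int) : Bool :=
  (pvCcw A C D != pvCcw B C D) && (pvCcw A B C != pvCcw A B D)

-- (nodes_x[v], nodes_y[v]): Python indexing (negative wraps); Pre_ keeps indices in range,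
-- so the .getD 0 default is never the value used
def pvPtA (nodes_x nodes_y : List Int) (v : Int) : Int × Int :=
  ((PySem.List.pyGet? nodes_x v).getD 0, (PySem.List.pyGet? nodes_y v).getD 0)

def is_planar (nodes_x : List Int) (nodes_y : List Int) (edges : List (Int × Int)) : Bool :=
  (List.range edges.length).all fun i =>
    (List.range' i (edges.length - i)).all fun ii =>
      let e1 := edges.getD i (0, 0)
      let e2 := edges.getD ii (0, 0)
      !(pvIntersect (pvPtA nodes_x nodes_y e1.1) (pvPtA nodes_x nodes_y e1.2)
          (pvPtA nodes_x nodes_y e2.1) (pvPtA nodes_x nodes_y e2.2))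

-- ===== PORT B =====
def pvOrient (p q r : Int × Int) : Int :=
  (q.1 - p.1) * (r.2 - p.2) - (q.2 - p.2) * (r.1 - p.1)

def pvCrosses (t s : (Int × Int) × (Int × Int)) : Bool :=
  (decide (0 < pvOrient t.1 t.2 s.1) != decide (0 < pvOrient t.1 t.2 s.2)) &&
  (decide (0 < pvOrient s.1 s.2 t.1) != decide (0 < pvOrient s.1 s.2 t.2))

-- lo = min(s[0][0], s[1][0]) and max(t[0][0], t[1][0]) in Source B
def pvMinX (s : (Int × Int) × (Int × Int)) : Int := min s.1.1 s.2.1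
def pvMaxX (s : (Int × Int) × (Int × Int)) : Int := max s.1.1 s.2.1

-- the for-loop over the sorted segments, carrying the active list
def pvSweep (active rest : List ((Int × Int) × (Int × Int))) : Bool :=
  match rest with
  | [] => true
  | s :: r =>
    let act := active.filter (fun t => decide (pvMinX s ≤ pvMaxX t))
    if act.any (fun t => pvCrosses t s) then false else pvSweep (act ++ [s]) r

-- segs = [...]; segs.sort(key=lambda s: min(s[0][0], s[1][0])); then the sweep
def is_planar_alt (nodes_x : List Int) (nodes_y : List Int) (edges : List (Int × Int)) : Bool :=
  pvSweep [] (PySem.List.sorted (edges.map fun e =>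
    (((PySem.List.pyGet? nodes_x e.1).getD 0, (PySem.List.pyGet? nodes_y e.1).getD 0),
     ((PySem.List.pyGet? nodes_x e.2).getD 0, (PySem.List.pyGet? nodes_y e.2).getD 0))) pvMinX)

-- ===== PRECONDITION & SPEC =====
-- Pre_ excludes inputs where some edge endpoint is not a valid Python index into nodes_x or
-- nodes_y: there A raises IndexError unless an earlier pair already crossed (then it returns
-- False), and B itself always raises IndexError since it looks up all endpoints first.
def Pre_is_planar (nodes_x : List Int) (nodes_y : List Int) (edges : List (Int × Int)) : Prop :=
  ∀ e ∈ edges, PySem.Raise.InRange nodes_x.length e.1 ∧ PySem.Raise.InRange nodes_y.length e.1 ∧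
               PySem.Raise.InRange nodes_x.length e.2 ∧ PySem.Raise.InRange nodes_y.length e.2
instance (nodes_x : List Int) (nodes_y : List Int) (edges : List (Int × Int)) : Decidable (Pre_is_planar nodes_x nodes_y edges) := by unfold Pre_is_planar; infer_instance

def pvWitness_is_planar : List Int × List Int × (List (Int × Int)) := ([0, 1], [0, 1], [(0, 1)])

def Spec_is_planar (nodes_x : List Int) (nodes_y : List Int) (edges : List (Int × Int)) (out : Bool) : Prop := out = is_planar_alt nodes_x nodes_y edges
instance (nodes_x : List Int) (nodes_y : List Int) (edges : List (Int × Int)) (out : Bool) : Decidable (Spec_is_planar nodes_x nodes_y edges out) := by unfold Spec_is_planar; infer_instance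

-- ===== CLAIM (what is proved, stated in full; the proofs are below) =====
def Claim_equal_is_planar : Prop := ∀ (nodes_x : List Int) (nodes_y : List Int) (edges : List (Int × Int)), Dom_is_planar nodes_x nodes_y edges → Pre_is_planar nodes_x nodes_y edges → Spec_is_planar nodes_x nodes_y edges (is_planar nodes_x nodes_y edges)

-- ===== LEMMAS AND PROOFS =====

-- "no segment of the list crosses another" — the common characterisation of both ports
def pvNoXP (l : List ((Int × Int) × (Int × Int))) : Prop :=
  ∀ x ∈ l, ∀ y ∈ l, pvCrosses x y = false

theorem pvCcw_eq_orient (A B C : Int × Int) :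
    pvCcw A B C = decide (0 < pvOrient A B C) := by
  simp only [pvCcw, pvOrient, gt_iff_lt, decide_eq_decide]
  constructor <;> intro h <;> nlinarith [h]

theorem pvOrient_cyc (p q r : Int × Int) : pvOrient p q r = pvOrient q r p := by
  simp only [pvOrient]; ring

theorem pvIntersect_eq_crosses (a b c d : Int × Int) :
    pvIntersect a b c d = pvCrosses (a, b) (c, d) := by
  simp only [pvIntersect, pvCrosses, pvCcw_eq_orient]
  rw [pvOrient_cyc a c d, pvOrient_cyc b c d]
  exact Bool.and_comm _ _

theorem pvCrosses_self (s : (Int × Int) × (Int × Int)) : pvCrosses s s = false := by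
  simp [pvCrosses, pvOrient, mul_comm]

theorem pvCrosses_comm (t s : (Int × Int) × (Int × Int)) : pvCrosses t s = pvCrosses s t := by
  simp only [pvCrosses]
  exact Bool.and_comm _ _

-- two segments whose x-projections are strictly disjoint cannot cross
theorem pvCrosses_x_disjoint (t s : (Int × Int) × (Int × Int))
    (h : pvMaxX t < pvMinX s) : pvCrosses t s = false := by
  obtain ⟨⟨ax, ay⟩, ⟨bx, by'⟩⟩ := t
  obtain ⟨⟨cx, cy⟩, ⟨dx, dy⟩⟩ := s
  simp only [pvMaxX, pvMinX, max_lt_iff, lt_min_iff] at h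
  obtain ⟨⟨h1, h2⟩, h3, h4⟩ := h
  rcases Bool.eq_false_or_eq_true (pvCrosses ((ax, ay), (bx, by')) ((cx, cy), (dx, dy))) with hT | hF
  case inr => exact hF
  exfalso
  simp only [pvCrosses, pvOrient, Bool.and_eq_true, bne_iff_ne, ne_eq, decide_eq_decide] at hT
  obtain ⟨hab, hcd⟩ := hT
  set o3 : Int := (bx - ax) * (cy - ay) - (by' - ay) * (cx - ax) with ho3
  set o4 : Int := (bx - ax) * (dy - ay) - (by' - ay) * (dx - ax) with ho4
  set o1 : Int := (dx - cx) * (ay - cy) - (dy - cy) * (ax - cx) with ho1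
  set o2 : Int := (dx - cx) * (by' - cy) - (dy - cy) * (bx - cx) with ho2
  have I1 : o1 - o2 + o3 - o4 = 0 := by simp only [ho1, ho2, ho3, ho4]; ring
  have I2 : bx * o1 - ax * o2 + dx * o3 - cx * o4 = 0 := by
    simp only [ho1, ho2, ho3, ho4]; ring
  set m : Int := min cx dx with hm
  have ham : ax < m := lt_min h1 h3
  have hbm : bx < m := lt_min h2 h4
  have hmc : m ≤ cx := min_le_left _ _
  have hmd : m ≤ dx := min_le_right _ _
  have I1m : m * (o1 - o2 + o3 - o4) = 0 := by rw [I1, mul_zero]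
  rcases lt_or_ge 0 o1 with ho1p | ho1n
  · -- o1 > 0, hence o2 ≤ 0; I1 then forces o4 > 0 and o3 ≤ 0
    have ho2n : o2 ≤ 0 := by
      by_contra hpos
      exact hcd (iff_of_true ho1p (by omega))
    have ho34 : o3 < o4 := by omega
    have ho4p : 0 < o4 := by
      rcases lt_or_ge 0 o3 with hp | hn
      · omega
      · by_contra hq
        exact hab (iff_of_false (by omega) (by omega))
    have ho3n : o3 ≤ 0 := by
      by_contra hp
      exact hab (iff_of_true (by omega) ho4p)
    have p1 : 0 < (m - bx) * o1 := mul_pos (by omega) ho1p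
    have p2 : 0 ≤ (m - ax) * (-o2) := mul_nonneg (by omega) (by omega)
    have p3 : 0 ≤ (dx - m) * (-o3) := mul_nonneg (by omega) (by omega)
    have p4 : 0 ≤ (cx - m) * o4 := mul_nonneg (by omega) ho4p.le
    nlinarith [p1, p2, p3, p4, I1m, I2]
  · -- o1 ≤ 0, hence o2 > 0; I1 then forces o3 > 0 and o4 ≤ 0
    have ho2p : 0 < o2 := by
      by_contra hq
      exact hcd (iff_of_false (by omega) (by omega))
    have ho34 : o4 < o3 := by omega
    have ho3p : 0 < o3 := by
      rcases lt_or_ge 0 o4 with hp | hn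
      · omega
      · by_contra hq
        exact hab (iff_of_false (by omega) (by omega))
    have ho4n : o4 ≤ 0 := by
      by_contra hp
      exact hab (iff_of_true ho3p (by omega))
    have p1 : 0 ≤ (m - bx) * (-o1) := mul_nonneg (by omega) (by omega)
    have p2 : 0 < (m - ax) * o2 := mul_pos (by omega) ho2p
    have p3 : 0 ≤ (dx - m) * o3 := mul_nonneg (by omega) ho3p.le
    have p4 : 0 ≤ (cx - m) * (-o4) := mul_nonneg (by omega) (by omega)
    nlinarith [p1, p2, p3, p4, I1m, I2]

-- the sweep returns true when no pair of segments crosses at all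
theorem pvSweep_of_noX : ∀ (rest active : List ((Int × Int) × (Int × Int))),
    (∀ t ∈ active ++ rest, ∀ s ∈ rest, pvCrosses t s = false) →
    pvSweep active rest = true := by
  intro rest
  induction rest with
  | nil => intro active _; rfl
  | cons s r ih =>
    intro active h
    simp only [pvSweep]
    have hany : (active.filter (fun t => decide (pvMinX s ≤ pvMaxX t))).any
        (fun t => pvCrosses t s) = false := by
      rw [List.any_eq_false]
      intro t ht
      have := h t (List.mem_append_left _ (List.mem_of_mem_filter ht)) s (by simp)
      simp [this]
    rw [hany]
    simp only [Bool.false_eq_true, if_false]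
    refine ih _ ?_
    intro t ht s' hs'
    rcases List.mem_append.mp ht with ht' | ht'
    · rcases List.mem_append.mp ht' with h2 | h2
      · exact h t (List.mem_append_left _ (List.mem_of_mem_filter h2)) s' (by simp [hs'])
      · simp only [List.mem_singleton] at h2
        subst h2
        exact h t (List.mem_append_right _ (by simp)) s' (by simp [hs'])
    · exact h t (List.mem_append_right _ (by simp [ht'])) s' (by simp [hs'])

-- if the sweep succeeds on a min-x-sorted list, every non-evicted pair was really tested
theorem pvSweep_true : ∀ (rest active : List ((Int × Int) × (Int × Int))),
    pvSweep active rest = true →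
    rest.Pairwise (fun a b => pvMinX a ≤ pvMinX b) →
    (∀ t ∈ active, ∀ s ∈ rest, pvMinX s ≤ pvMaxX t → pvCrosses t s = false) ∧
    rest.Pairwise (fun t s => pvMinX s ≤ pvMaxX t → pvCrosses t s = false) := by
  intro rest
  induction rest with
  | nil => intro active _ _; exact ⟨by simp, List.Pairwise.nil⟩
  | cons s r ih =>
    intro active hgo hsort
    rw [List.pairwise_cons] at hsort
    obtain ⟨hs_le, hsort_r⟩ := hsort
    simp only [pvSweep] at hgo
    by_cases hany : (active.filter (fun t => decide (pvMinX s ≤ pvMaxX t))).any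
        (fun t => pvCrosses t s) = true
    · rw [if_pos hany] at hgo
      cases hgo
    · rw [if_neg hany] at hgo
      have hAnyF : ∀ t ∈ active.filter (fun t => decide (pvMinX s ≤ pvMaxX t)),
          pvCrosses t s = false := by
        intro t ht
        rcases Bool.eq_false_or_eq_true (pvCrosses t s) with hc | hc
        · exact absurd (List.any_eq_true.mpr ⟨t, ht, hc⟩) hany
        · exact hc
      obtain ⟨ihA, ihP⟩ :=
        ih (active.filter (fun t => decide (pvMinX s ≤ pvMaxX t)) ++ [s]) hgo hsort_r
      refine ⟨?_, ?_⟩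
      · intro t ht s' hs' hle
        rcases List.mem_cons.mp hs' with rfl | hs'
        · exact hAnyF t (List.mem_filter.mpr ⟨ht, by simpa using hle⟩)
        · have hkeep : pvMinX s ≤ pvMaxX t := le_trans (hs_le s' hs') hle
          exact ihA t (List.mem_append_left _ (List.mem_filter.mpr ⟨ht, by simpa using hkeep⟩))
            s' hs' hle
      · rw [List.pairwise_cons]
        exact ⟨fun s' hs' hle => ihA s (List.mem_append_right _ (by simp)) s' hs' hle, ihP⟩

-- A returns true exactly when no segment of the edge list crosses another
theorem pvA_iff (nodes_x nodes_y : List Int) (edges : List (Int × Int)) :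
    is_planar nodes_x nodes_y edges = true ↔
      pvNoXP (edges.map fun e =>
        (((PySem.List.pyGet? nodes_x e.1).getD 0, (PySem.List.pyGet? nodes_y e.1).getD 0),
         ((PySem.List.pyGet? nodes_x e.2).getD 0, (PySem.List.pyGet? nodes_y e.2).getD 0))) := by
  set f : (Int × Int) → ((Int × Int) × (Int × Int)) :=
    fun e => (((PySem.List.pyGet? nodes_x e.1).getD 0, (PySem.List.pyGet? nodes_y e.1).getD 0),
              ((PySem.List.pyGet? nodes_x e.2).getD 0, (PySem.List.pyGet? nodes_y e.2).getD 0))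
    with hf
  have hlen : (edges.map f).length = edges.length := by simp
  have hseg : ∀ i : Nat, (hi : i < edges.length) →
      (edges.map f)[i]'(by simpa [hlen] using hi) = f (edges.getD i (0, 0)) := by
    intro i hi
    rw [List.getElem_map, List.getD_eq_getElem _ _ hi]
  have hA : is_planar nodes_x nodes_y edges = true ↔
      ∀ i : Nat, i < edges.length → ∀ ii : Nat, i ≤ ii → ii < edges.length →
        pvIntersect (pvPtA nodes_x nodes_y (edges.getD i (0,0)).1)
          (pvPtA nodes_x nodes_y (edges.getD i (0,0)).2)
          (pvPtA nodes_x nodes_y (edges.getD ii (0,0)).1)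
          (pvPtA nodes_x nodes_y (edges.getD ii (0,0)).2) = false := by
    simp only [is_planar, List.all_eq_true, List.mem_range, List.mem_range'_1,
      Bool.not_eq_true']
    constructor
    · intro h i hi ii h1 h2
      exact h i hi ii ⟨h1, by omega⟩
    · intro h i hi ii ⟨h1, h2⟩
      exact h i hi ii h1 (by omega)
  have hF : ∀ i ii : Nat, (hi : i < edges.length) → (hii : ii < edges.length) →
      pvIntersect (pvPtA nodes_x nodes_y (edges.getD i (0,0)).1)
        (pvPtA nodes_x nodes_y (edges.getD i (0,0)).2)
        (pvPtA nodes_x nodes_y (edges.getD ii (0,0)).1)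
        (pvPtA nodes_x nodes_y (edges.getD ii (0,0)).2)
      = pvCrosses ((edges.map f)[i]'(by simpa [hlen] using hi))
          ((edges.map f)[ii]'(by simpa [hlen] using hii)) := by
    intro i ii hi hii
    rw [hseg i hi, hseg ii hii, pvIntersect_eq_crosses]
    rfl
  rw [hA]
  constructor
  · intro h x hx y hy
    obtain ⟨i, hi, rfl⟩ := List.mem_iff_getElem.mp hx
    obtain ⟨j, hj, rfl⟩ := List.mem_iff_getElem.mp hy
    rcases Nat.lt_or_ge j i with hij | hij
    · rw [pvCrosses_comm, ← hF j i (by simpa [hlen] using hj) (by omega)]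
      exact h j (by simpa [hlen] using hj) i (by omega) (by omega)
    · rw [← hF i j (by omega) (by simpa [hlen] using hj)]
      exact h i (by omega) j hij (by simpa [hlen] using hj)
  · intro h i hi ii h1 h2
    rw [hF i ii hi h2]
    exact h _ (List.getElem_mem _) _ (List.getElem_mem _)

-- the two ports agree (unconditionally, in fact)
theorem pv_main (nodes_x nodes_y : List Int) (edges : List (Int × Int)) :
    is_planar nodes_x nodes_y edges = is_planar_alt nodes_x nodes_y edges := by
  set f : (Int × Int) → ((Int × Int) × (Int × Int)) :=
    fun e => (((PySem.List.pyGet? nodes_x e.1).getD 0, (PySem.List.pyGet? nodes_y e.1).getD 0),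
              ((PySem.List.pyGet? nodes_x e.2).getD 0, (PySem.List.pyGet? nodes_y e.2).getD 0))
    with hf
  set segs := edges.map f with hsegs
  set ss := PySem.List.sorted segs pvMinX with hss
  have hperm : ss.Perm segs := PySem.List.sorted_perm segs pvMinX false
  have halt : is_planar_alt nodes_x nodes_y edges = pvSweep [] ss := rfl
  rw [Bool.eq_iff_iff, pvA_iff, halt]
  constructor
  · intro hno
    apply pvSweep_of_noX
    intro t ht s hs
    exact hno t (hperm.mem_iff.mp (by simpa using ht)) s (hperm.mem_iff.mp hs)
  · intro hsw
    have hpair := (pvSweep_true ss [] hsw (PySem.List.sorted_pairwise segs pvMinX)).2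
    have hpair2 : ss.Pairwise (fun t s => pvCrosses t s = false) := by
      refine hpair.imp ?_
      intro a b hcond
      rcases lt_or_ge (pvMaxX a) (pvMinX b) with hlt | hle
      · exact pvCrosses_x_disjoint a b hlt
      · exact hcond hle
    have hsym : Symmetric (fun t s => pvCrosses t s = false) := by
      intro a b hab
      rw [pvCrosses_comm]
      exact hab
    intro x hx y hy
    by_cases hxy : x = y
    · subst hxy
      exact pvCrosses_self x
    · exact hpair2.forall hsym (hperm.mem_iff.mpr hx) (hperm.mem_iff.mpr hy) hxy

-- ===== VERDICT (by name: the statement is the Claim_ definition above) =====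
theorem is_planar_spec : Claim_equal_is_planar := by
  intro nodes_x nodes_y edges _ _
  unfold Spec_is_planar
  exact pv_main nodes_x nodes_y edges
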